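-- pv_equiv track=rewrite | github.com/gudwh14/algorithm | boj/dp/병사 배치하기.py | solution
-- ===== SOURCE A (Python) =====
-- def solution(N, soldiers):
--     # 병사 정보를 뒤집어 최장 증가 부분 수열 문제로 치환
--     # 기본값은 1
--     dp = [1] * N
--     soldiers.reverse()
--
--     # LIS를 구하는 로직
--     for i in range(1, N):
--         for j in range(i):
--             if soldiers[j] < soldiers[i]:
--                 dp[i] = max(dp[i], dp[j] + 1)
--
--     return N - max(dp)
-- ===== SOURCE B (Python) =====
-- def solution(N, soldiers):
--     # Patience-sorting LIS (strict) over the soldiers taken from the back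
--     # (the reversed order A uses); A reverses `soldiers` in place, B does not.
--     tails = []
--     for i in range(N):
--         x = soldiers[-1 - i]
--         lo, hi = 0, len(tails)
--         while lo < hi:
--             mid = (lo + hi) // 2
--             if tails[mid] < x:
--                 lo = mid + 1
--             else:
--                 hi = mid
--         if lo == len(tails):
--             tails.append(x)
--         else:
--             tails[lo] = x
--     return N - len(tails)
-- ===== Notes on version B (the rewrite author's own statement) =====
-- stated objective: faster
-- what changed: Replaces A's O(N^2) nested-loop LIS dynamic programming with patience sorting: one pass over the (reversed) soldiers keeping the sorted list of minimal tail values and locating each element by a hand-written bisect_left binary search.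
-- outside the precondition, e.g. on solution(1, []): A returns 0, B raises IndexError
import Mathlib
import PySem

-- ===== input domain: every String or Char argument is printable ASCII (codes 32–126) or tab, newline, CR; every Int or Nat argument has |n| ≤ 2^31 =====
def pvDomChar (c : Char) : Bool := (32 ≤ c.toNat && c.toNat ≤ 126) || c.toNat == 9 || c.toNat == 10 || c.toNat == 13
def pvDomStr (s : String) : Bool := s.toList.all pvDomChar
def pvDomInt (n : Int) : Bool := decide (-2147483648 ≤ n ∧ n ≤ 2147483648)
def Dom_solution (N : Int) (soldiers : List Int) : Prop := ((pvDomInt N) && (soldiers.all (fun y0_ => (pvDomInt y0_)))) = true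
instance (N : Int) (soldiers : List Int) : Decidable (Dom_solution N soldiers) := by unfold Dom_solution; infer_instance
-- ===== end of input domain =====

-- B replaces A's O(N^2) nested-loop LIS DP by patience sorting with a hand-rolled
-- binary search (O(N log N)); return value only: A reverses `soldiers` in place, B does not mutate it.


-- ===== PORT A =====
-- literal transliteration of A: dp = [1]*N; soldiers.reverse(); nested range loops;
-- out-of-range reads use default 0 — they never occur under Pre_solution.
def solution (N : Int) (soldiers : List Int) : Int :=
  let dp0 : List Int := List.replicate N.toNat 1
  let s := soldiers.reverse
  let dp := (PySem.List.pyRange 1 N 1).foldl (fun dp i =>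
      (PySem.List.pyRange 0 i 1).foldl (fun dp j =>
        if PySem.List.pyGetD s j 0 < PySem.List.pyGetD s i 0 then
          PySem.List.pySetD dp i (max (PySem.List.pyGetD dp i 0) (PySem.List.pyGetD dp j 0 + 1))
        else dp) dp) dp0
  N - (PySem.List.max? dp (fun y => y)).getD 0

-- ===== PORT B =====
-- B's while-loop binary search (bisect_left by hand), transliterated as recursion on hi - lo
def bsearchB (tails : List Int) (x : Int) (lo hi : Int) : Int :=
  if h : lo < hi then
    let mid := PySem.Int.floordiv (lo + hi) 2
    if PySem.List.pyGetD tails mid 0 < x then bsearchB tails x (mid + 1) hi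
    else bsearchB tails x lo mid
  else lo
termination_by (hi - lo).toNat
decreasing_by
  · have h1 : lo ≤ PySem.Int.floordiv (lo + hi) 2 := by
      rw [PySem.Int.le_floordiv_iff_mul_le] <;> omega
    omega
  · have h2 : PySem.Int.floordiv (lo + hi) 2 < hi := by
      rw [PySem.Int.floordiv_lt_iff_lt_mul] <;> omega
    omega

-- x = soldiers[-1-i]: PySem.List.pyGetD with default 0 — under Pre_solution the index is in range.
def solution_alt (N : Int) (soldiers : List Int) : Int :=
  let tails := (PySem.List.pyRange 0 N 1).foldl (fun tails i =>
      let x := PySem.List.pyGetD soldiers (-1 - i) 0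
      let lo := bsearchB tails x 0 (PySem.List.len tails)
      if lo = PySem.List.len tails then tails ++ [x]
      else PySem.List.pySetD tails lo x) []
  N - PySem.List.len tails

-- ===== PRECONDITION & SPEC =====
-- Pre_ excludes N outside [1, len(soldiers)]: there A raises (ValueError on max([]) for N ≤ 0,
-- IndexError for N ≥ 2 with N > len), except the single degenerate shape N = 1 with an empty
-- list, where A's value 0 is an artefact of malformed input (N is the declared soldier count).
def Pre_solution (N : Int) (soldiers : List Int) : Prop :=
  1 ≤ N ∧ N ≤ soldiers.length
instance (N : Int) (soldiers : List Int) : Decidable (Pre_solution N soldiers) := by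
  unfold Pre_solution; infer_instance

def pvWitness_solution : Int × List Int := (5, [4, 2, 5, 8, 4])

def Spec_solution (N : Int) (soldiers : List Int) (out : Int) : Prop := out = solution_alt N soldiers
instance (N : Int) (soldiers : List Int) (out : Int) : Decidable (Spec_solution N soldiers out) := by
  unfold Spec_solution; infer_instance

-- ===== CLAIM (what is proved, stated in full; the proofs are below) =====
def Claim_equal_solution : Prop := ∀ (N : Int) (soldiers : List Int), Dom_solution N soldiers → Pre_solution N soldiers → Spec_solution N soldiers (solution N soldiers)

-- ===== LEMMAS AND PROOFS =====

-- running max with floor 0 (proof-side helper)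
def listMax0 (l : List Int) : Int := l.foldl max 0

-- dp-candidate values: dp's of earlier elements smaller than x
def dpCand (P : List (Int × Int)) (x : Int) : List Int :=
  P.filterMap (fun p => if p.1 < x then some p.2 else none)

-- reference quadratic DP: list of (value, dp) pairs, built left to right
def dpStep (P : List (Int × Int)) (x : Int) : List (Int × Int) :=
  P ++ [(x, 1 + listMax0 (dpCand P x))]

def dpPairs (l : List Int) : List (Int × Int) := l.foldl dpStep []

def dpVals (l : List Int) : List Int := (dpPairs l).map Prod.snd

-- reference patience step: replace-at-count form of B's loop body
def patStep (tails : List Int) (x : Int) : List Int :=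
  let c := tails.countP (fun y => decide (y < x))
  if c = tails.length then tails ++ [x] else tails.set c x

def patience (l : List Int) : List Int := l.foldl patStep []

-- --- listMax0 facts ---
theorem listMax0_nonneg (l : List Int) : 0 ≤ listMax0 l :=
  (PySem.List.le_foldl_max l 0).1

theorem le_listMax0 {l : List Int} {y : Int} (h : y ∈ l) : y ≤ listMax0 l :=
  (PySem.List.le_foldl_max l 0).2 y h

theorem listMax0_append_singleton (l : List Int) (y : Int) :
    listMax0 (l ++ [y]) = max (listMax0 l) y := by
  simp [listMax0, List.foldl_append]

theorem listMax0_le {l : List Int} {b : Int} (hb : 0 ≤ b) (h : ∀ y ∈ l, y ≤ b) :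
    listMax0 l ≤ b := by
  induction l using List.reverseRecOn with
  | nil => simpa [listMax0]
  | append_singleton l y ih =>
    rw [listMax0_append_singleton]
    exact max_le (ih fun z hz => h z (by simp [hz])) (h y (by simp))

theorem listMax0_cons_of_nonneg {h : Int} (t : List Int) (hh : 0 ≤ h) :
    listMax0 (h :: t) = t.foldl max h := by
  simp [listMax0, List.foldl_cons, max_eq_right hh]

-- --- structural facts about dpPairs / patience ---
theorem dpPairs_append_singleton (l : List Int) (x : Int) :
    dpPairs (l ++ [x]) = dpPairs l ++ [(x, 1 + listMax0 (dpCand (dpPairs l) x))] := by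
  simp [dpPairs, List.foldl_append, dpStep]

theorem patience_append_singleton (l : List Int) (x : Int) :
    patience (l ++ [x]) = patStep (patience l) x := by
  simp [patience, List.foldl_append]

theorem map_fst_dpPairs (l : List Int) : (dpPairs l).map Prod.fst = l := by
  induction l using List.reverseRecOn with
  | nil => simp [dpPairs]
  | append_singleton l x ih => simp [dpPairs_append_singleton, ih]

theorem length_dpPairs (l : List Int) : (dpPairs l).length = l.length := by
  have := congrArg List.length (map_fst_dpPairs l); simpa using this

theorem one_le_snd_dpPairs {l : List Int} {p : Int × Int} (h : p ∈ dpPairs l) : 1 ≤ p.2 := by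
  induction l using List.reverseRecOn with
  | nil => simp [dpPairs] at h
  | append_singleton l x ih =>
    rw [dpPairs_append_singleton] at h
    rcases List.mem_append.1 h with h' | h'
    · exact ih h'
    · simp at h'; rw [h']; have := listMax0_nonneg (dpCand (dpPairs l) x); omega

theorem fst_dpPairs_getElem (l : List Int) (k : Nat) (h : k < l.length) :
    ((dpPairs l)[k]'(by rw [length_dpPairs]; exact h)).1 = l[k] := by
  have h2 : k < ((dpPairs l).map Prod.fst).length := by
    simp [length_dpPairs]; exact h
  have := List.getElem_of_eq (map_fst_dpPairs l) h2
  simpa using this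

theorem dpCand_append_singleton (P : List (Int × Int)) (p : Int × Int) (x : Int) :
    dpCand (P ++ [p]) x = dpCand P x ++ (if p.1 < x then [p.2] else []) := by
  simp only [dpCand, List.filterMap_append]
  congr 1
  split <;> simp_all

theorem sorted_lt_iff_lt_countP {t : List Int} (ht : t.Pairwise (· < ·)) (x : Int) :
    ∀ k, (hk : k < t.length) → (t[k] < x ↔ k < t.countP (fun y => decide (y < x))) := by
  induction t with
  | nil => intro k hk; simp at hk
  | cons a tl ih =>
    have ha := (List.pairwise_cons.1 ht).1
    have htl := (List.pairwise_cons.1 ht).2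
    intro k hk
    by_cases hax : a < x
    · rcases k with _ | k
      · simp [hax]
      · have hk' : k < tl.length := by simpa using hk
        simp only [List.getElem_cons_succ, List.countP_cons, hax]
        rw [ih htl k hk']
        simp
    · have h0 : tl.countP (fun y => decide (y < x)) = 0 := by
        rw [List.countP_eq_zero]
        intro y hy; simp; have := ha y hy; omega
      rcases k with _ | k
      · simp [hax, h0]
      · have hk' : k < tl.length := by simpa using hk
        simp only [List.getElem_cons_succ, List.countP_cons, hax, h0]
        have hkx : ¬ tl[k] < x := by
          have := ha tl[k] (by simp)
          omega
        simp [hkx]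

theorem bsearchB_range {t : List Int} (ht : t.Pairwise (· < ·)) (x : Int) :
    ∀ (fuel : Nat) (lo hi : Int), (hi - lo).toNat ≤ fuel → 0 ≤ lo → hi ≤ (t.length : Int) →
      lo ≤ (t.countP (fun y => decide (y < x)) : Int) →
      (t.countP (fun y => decide (y < x)) : Int) ≤ hi →
      bsearchB t x lo hi = (t.countP (fun y => decide (y < x)) : Int) := by
  intro fuel
  induction fuel with
  | zero =>
    intro lo hi hf h0 hlen hlc hch
    rw [bsearchB]
    have : ¬ lo < hi := by omega
    simp [this]; omega
  | succ n ih =>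
    intro lo hi hf h0 hlen hlc hch
    rw [bsearchB]
    by_cases hlt : lo < hi
    · simp only [hlt, dif_pos]
      have h1 : lo ≤ PySem.Int.floordiv (lo + hi) 2 := by
        rw [PySem.Int.le_floordiv_iff_mul_le] <;> omega
      have h2 : PySem.Int.floordiv (lo + hi) 2 < hi := by
        rw [PySem.Int.floordiv_lt_iff_lt_mul] <;> omega
      set mid := PySem.Int.floordiv (lo + hi) 2 with hmid
      have hmidlen : mid.toNat < t.length := by omega
      have hget : PySem.List.pyGetD t mid 0 = t[mid.toNat] := by
        rw [PySem.List.pyGetD_eq_getElem] <;> omega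
      have hiff := sorted_lt_iff_lt_countP ht x mid.toNat hmidlen
      by_cases hc : PySem.List.pyGetD t mid 0 < x
      · simp only [hc, if_pos]
        have : mid.toNat < t.countP (fun y => decide (y < x)) := hiff.1 (by rw [← hget]; exact hc)
        exact ih (mid + 1) hi (by omega) (by omega) hlen (by omega) hch
      · simp only [hc, if_neg, not_false_iff]
        have : ¬ mid.toNat < t.countP (fun y => decide (y < x)) := fun h => hc (by rw [hget]; exact hiff.2 h)
        exact ih lo mid (by omega) h0 (by omega) hlc (by omega)
    · simp [hlt]; omega

theorem bsearchB_eq {t : List Int} (ht : t.Pairwise (· < ·)) (x : Int) :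
    bsearchB t x 0 (PySem.List.len t) = (t.countP (fun y => decide (y < x)) : Int) := by
  have hcle : t.countP (fun y => decide (y < x)) ≤ t.length := List.countP_le_length
  rw [PySem.List.len_eq]
  exact bsearchB_range ht x (t.length) 0 t.length (by omega) (by omega) (by omega)
    (by exact_mod_cast Int.natCast_nonneg _) (by exact_mod_cast hcle)

theorem pat_inv (l : List Int) :
    (patience l).Pairwise (· < ·) ∧
    ((patience l).length : Int) = listMax0 (dpVals l) ∧
    ∀ m, (hm : m < (patience l).length) →
      (∃ p ∈ dpPairs l, p.2 = (m : Int) + 1 ∧ p.1 = (patience l)[m]) ∧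
      (∀ p ∈ dpPairs l, p.2 = (m : Int) + 1 → (patience l)[m] ≤ p.1) := by
  induction l using List.reverseRecOn with
  | nil => refine ⟨by simp [patience], by simp [patience, dpVals, dpPairs, listMax0], ?_⟩
           intro m hm; simp [patience] at hm
  | append_singleton l x ih =>
    obtain ⟨hsort, hlen, hmin⟩ := ih
    set t := patience l with htdef
    set P := dpPairs l with hPdef
    set c := t.countP (fun y => decide (y < x)) with hcdef
    have hclen : c ≤ t.length := List.countP_le_length
    have hsnd_le : ∀ p ∈ P, p.2 ≤ (t.length : Int) := by
      intro p hp
      rw [hlen]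
      exact le_listMax0 (List.mem_map.2 ⟨p, hp, rfl⟩)
    -- the count equals the dp candidate max
    have hMc : listMax0 (dpCand P x) = (c : Int) := by
      apply le_antisymm
      · apply listMax0_le (by positivity)
        intro d hd
        obtain ⟨p, hp, hpd⟩ := List.mem_filterMap.1 hd
        by_cases hpx : p.1 < x
        · simp [hpx] at hpd
          have h1 : 1 ≤ p.2 := one_le_snd_dpPairs hp
          have h2 : p.2 ≤ (t.length : Int) := hsnd_le p hp
          have hm' : p.2.toNat - 1 < t.length := by omega
          have hmcast : ((p.2.toNat - 1 : Nat) : Int) + 1 = p.2 := by omega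
          have := (hmin (p.2.toNat - 1) hm').2 p hp hmcast.symm
          have htx : t[p.2.toNat - 1] < x := lt_of_le_of_lt this hpx
          have := (sorted_lt_iff_lt_countP hsort x (p.2.toNat - 1) hm').1 htx
          omega
        · simp [hpx] at hpd
      · by_cases hc0 : c = 0
        · rw [hc0]; exact_mod_cast listMax0_nonneg _
        · have hm' : c - 1 < t.length := by omega
          have htx : t[c - 1] < x :=
            (sorted_lt_iff_lt_countP hsort x (c - 1) hm').2 (by omega)
          obtain ⟨p, hp, hp2, hp1⟩ := (hmin (c - 1) hm').1
          have hpx : p.1 < x := by rw [hp1]; exact htx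
          have hmem : p.2 ∈ dpCand P x :=
            List.mem_filterMap.2 ⟨p, hp, by simp [hpx]⟩
          have := le_listMax0 hmem
          have hc' : ((c - 1 : Nat) : Int) + 1 = (c : Int) := by omega
          omega
    have hnewP : dpPairs (l ++ [x]) = P ++ [(x, (c : Int) + 1)] := by
      rw [dpPairs_append_singleton, hMc, ← hPdef]; ring_nf
    have hnewt : patience (l ++ [x]) = patStep t x := patience_append_singleton l x
    have hnewV : listMax0 (dpVals (l ++ [x])) = max (listMax0 (dpVals l)) ((c : Int) + 1) := by
      rw [dpVals, hnewP, List.map_append]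
      simpa using listMax0_append_singleton (P.map Prod.snd) ((c : Int) + 1)
    by_cases hcfull : c = t.length
    · -- append case
      have ht' : patience (l ++ [x]) = t ++ [x] := by
        rw [hnewt, patStep]; simp [← hcdef, hcfull]
      have hallx : ∀ y ∈ t, y < x := by
        have := (List.countP_eq_length).1 (hcdef ▸ hcfull)
        intro y hy; simpa using this y hy
      refine ⟨?_, ?_, ?_⟩
      · rw [ht', List.pairwise_append]
        exact ⟨hsort, by simp, by intro a ha b hb; simp at hb; subst hb; exact hallx a ha⟩
      · rw [ht', hnewV, ← hlen]
        simp [hcfull]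
      · intro m hm
        simp only [ht'] at hm ⊢
        simp only [List.length_append, List.length_cons, List.length_nil] at hm
        by_cases hmt : m < t.length
        · constructor
          · obtain ⟨p, hp, hp2, hp1⟩ := (hmin m hmt).1
            exact ⟨p, by rw [hnewP]; exact List.mem_append_left _ hp, hp2,
              by rw [List.getElem_append_left hmt]; exact hp1⟩
          · intro p hp hp2
            rw [hnewP] at hp
            rcases List.mem_append.1 hp with h' | h'
            · rw [List.getElem_append_left hmt]; exact (hmin m hmt).2 p h' hp2
            · simp at h'
              rw [h'] at hp2
              simp at hp2
              omega
        · have hmeq : m = t.length := by omega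
          subst hmeq
          constructor
          · refine ⟨(x, (c : Int) + 1), by rw [hnewP]; simp, by omega, ?_⟩
            simp
          · intro p hp hp2
            rw [hnewP] at hp
            rcases List.mem_append.1 hp with h' | h'
            · have := hsnd_le p h'; omega
            · simp at h'
              subst h'
              simp
    · -- replace case
      have hclt : c < t.length := lt_of_le_of_ne hclen hcfull
      have ht' : patience (l ++ [x]) = t.set c x := by
        rw [hnewt, patStep]; simp [← hcdef, hcfull]
      have hxc : x ≤ t[c] := by
        have hiff := sorted_lt_iff_lt_countP hsort x c hclt
        by_contra h
        have := hiff.1 (by omega)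
        omega
      have hg := List.pairwise_iff_getElem.1 hsort
      refine ⟨?_, ?_, ?_⟩
      · rw [ht']
        apply List.pairwise_iff_getElem.2
        intro i j hi hj hij
        simp only [List.length_set] at hi hj
        simp only [List.getElem_set]
        by_cases hic : c = i
        · subst hic
          have hcj : c ≠ j := by omega
          simp only [if_neg hcj]
          exact lt_of_le_of_lt hxc (hg c j hclt hj hij)
        · by_cases hjc : c = j
          · subst hjc
            simp only [if_neg hic]
            exact (sorted_lt_iff_lt_countP hsort x i hi).2 (by omega)
          · simp only [if_neg hic, if_neg hjc]
            exact hg i j hi hj hij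
      · rw [ht', hnewV, ← hlen]
        simp only [List.length_set]
        omega
      · intro m hm
        simp only [ht'] at hm ⊢
        simp only [List.length_set] at hm
        by_cases hmc : m = c
        · subst hmc
          have hset : (t.set c x)[c]'(by simpa using hm) = x := by
            simp
          constructor
          · exact ⟨(x, (c : Int) + 1), by rw [hnewP]; simp, by omega, by rw [hset]⟩
          · intro p hp hp2
            rw [hnewP] at hp
            rcases List.mem_append.1 hp with h' | h'
            · have := (hmin c hm).2 p h' (by omega)
              rw [hset]; omega
            · simp at h'
              subst h'
              rw [hset]
        · have hset : (t.set c x)[m]'(by simpa using hm) = t[m] := by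
            rw [List.getElem_set_ne (by omega)]
          constructor
          · obtain ⟨p, hp, hp2, hp1⟩ := (hmin m hm).1
            exact ⟨p, by rw [hnewP]; exact List.mem_append_left _ hp, hp2, by rw [hset]; exact hp1⟩
          · intro p hp hp2
            rw [hnewP] at hp
            rcases List.mem_append.1 hp with h' | h'
            · rw [hset]; exact (hmin m hm).2 p h' hp2
            · simp at h'
              rw [h'] at hp2
              simp at hp2
              omega

theorem innerAux (s : List Int) (m t : Nat) (hm : m < t) (ht : t ≤ s.length) :
    ∀ c : Nat, c ≤ m →
    (PySem.List.pyRange 0 (c : Int) 1).foldl (fun dp j =>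
        if PySem.List.pyGetD s j 0 < PySem.List.pyGetD s (m : Int) 0 then
          PySem.List.pySetD dp (m : Int)
            (max (PySem.List.pyGetD dp (m : Int) 0) (PySem.List.pyGetD dp j 0 + 1))
        else dp) (dpVals (s.take m) ++ List.replicate (t - m) 1)
    = (dpVals (s.take m) ++ List.replicate (t - m) 1).set m
        (1 + listMax0 (dpCand ((dpPairs (s.take m)).take c) (s[m]'(by omega)))) := by
  have hlenD : (dpVals (s.take m)).length = m := by
    simp [dpVals, length_dpPairs]; omega
  have hlen_in : (dpVals (s.take m) ++ List.replicate (t - m) 1).length = t := by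
    simp [hlenD]; omega
  have hms : m < (dpVals (s.take m) ++ List.replicate (t - m) 1).length := by omega
  have hget_in_m : (dpVals (s.take m) ++ List.replicate (t - m) 1)[m]'hms = 1 := by
    rw [List.getElem_append_right (by omega)]
    simp [hlenD]
  intro c
  induction c with
  | zero =>
    intro _
    rw [show ((0:Nat):Int) = 0 by simp, PySem.List.pyRange_one_eq_nil le_rfl]
    simp only [List.foldl_nil, List.take_zero]
    rw [show dpCand [] (s[m]'(by omega)) = [] from rfl]
    rw [show (1 : Int) + listMax0 [] = 1 by simp [listMax0]]
    calc dpVals (s.take m) ++ List.replicate (t - m) 1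
        = (dpVals (s.take m) ++ List.replicate (t - m) 1).set m
            ((dpVals (s.take m) ++ List.replicate (t - m) 1)[m]'hms) :=
          (List.set_getElem_self ..).symm
      _ = _ := by rw [hget_in_m]
  | succ c ih =>
    intro hc1
    have hc : c ≤ m := by omega
    have hcP : c < (dpPairs (s.take m)).length := by rw [length_dpPairs]; simp; omega
    have hcast : ((c + 1 : Nat) : Int) = (c : Int) + 1 := by push_cast; ring
    rw [hcast, PySem.List.pyRange_one_succ_right (by positivity), List.foldl_append,
      ih hc]
    simp only [List.foldl_cons, List.foldl_nil]
    set D := dpVals (s.take m) with hD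
    set dpin := D ++ List.replicate (t - m) 1 with hdpin
    set x := s[m]'(by omega) with hx
    have hgs_c : PySem.List.pyGetD s (c : Int) 0 = s[c]'(by omega) := by
      rw [PySem.List.pyGetD_natCast]; exact List.getD_eq_getElem _ _ (by omega)
    have hgs_m : PySem.List.pyGetD s (m : Int) 0 = x := by
      rw [PySem.List.pyGetD_natCast]; exact List.getD_eq_getElem _ _ (by omega)
    set Fc := 1 + listMax0 (dpCand ((dpPairs (s.take m)).take c) x) with hFc
    have hget_set_m : PySem.List.pyGetD (dpin.set m Fc) (m : Int) 0 = Fc := by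
      rw [PySem.List.pyGetD_natCast, List.getD_eq_getElem _ _ (by rw [List.length_set]; omega)]
      simp
    have hget_set_c : PySem.List.pyGetD (dpin.set m Fc) (c : Int) 0
        = ((dpPairs (s.take m))[c]'hcP).2 := by
      rw [PySem.List.pyGetD_natCast, List.getD_eq_getElem _ _ (by rw [List.length_set]; omega)]
      rw [List.getElem_set_ne (by omega)]
      rw [List.getElem_append_left (by omega)]
      simp [hD, dpVals]
    have htake : (dpPairs (s.take m)).take (c + 1)
        = (dpPairs (s.take m)).take c ++ [(dpPairs (s.take m))[c]'hcP] :=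
      List.take_succ_eq_append_getElem hcP
    have hfst : ((dpPairs (s.take m))[c]'hcP).1 = s[c]'(by omega) := by
      rw [fst_dpPairs_getElem (s.take m) c (by simp; omega)]
      simp [List.getElem_take]
    by_cases hcond : s[c]'(by omega) < x
    · rw [if_pos (by rw [hgs_c, hgs_m]; exact hcond)]
      rw [hget_set_m, hget_set_c]
      rw [PySem.List.pySetD_natCast, List.set_set]
      congr 1
      rw [htake, dpCand_append_singleton]
      rw [if_pos (show ((dpPairs (s.take m))[c]'hcP).1 < x by rw [hfst]; exact hcond)]
      rw [listMax0_append_singleton, hFc]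
      omega
    · rw [if_neg (by rw [hgs_c, hgs_m]; exact hcond)]
      congr 1
      rw [htake, dpCand_append_singleton]
      rw [if_neg (show ¬ ((dpPairs (s.take m))[c]'hcP).1 < x by rw [hfst]; exact hcond)]
      simp
      exact hFc

theorem dpVals_append_singleton (l : List Int) (x : Int) :
    dpVals (l ++ [x]) = dpVals l ++ [1 + listMax0 (dpCand (dpPairs l) x)] := by
  simp [dpVals, dpPairs_append_singleton]

theorem innerLoop (s : List Int) (m t : Nat) (hm : m < t) (ht : t ≤ s.length) :
    (PySem.List.pyRange 0 (m : Int) 1).foldl (fun dp j =>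
        if PySem.List.pyGetD s j 0 < PySem.List.pyGetD s (m : Int) 0 then
          PySem.List.pySetD dp (m : Int)
            (max (PySem.List.pyGetD dp (m : Int) 0) (PySem.List.pyGetD dp j 0 + 1))
        else dp) (dpVals (s.take m) ++ List.replicate (t - m) 1)
    = dpVals (s.take (m + 1)) ++ List.replicate (t - (m + 1)) 1 := by
  have hlenD : (dpVals (s.take m)).length = m := by
    simp [dpVals, length_dpPairs]; omega
  have h1 := innerAux s m t hm ht m le_rfl
  have htk : (dpPairs (s.take m)).take m = dpPairs (s.take m) :=
    List.take_of_length_le (by rw [length_dpPairs]; simp)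
  rw [htk] at h1
  rw [h1]
  rw [List.set_append_right _ _ (by omega)]
  rw [show m - (dpVals (s.take m)).length = 0 by omega]
  rw [show t - m = (t - (m + 1)) + 1 by omega, List.replicate_succ]
  rw [show ((1 : Int) :: List.replicate (t - (m + 1)) 1).set 0
        (1 + listMax0 (dpCand (dpPairs (s.take m)) (s[m]'(by omega))))
      = (1 + listMax0 (dpCand (dpPairs (s.take m)) (s[m]'(by omega))))
        :: List.replicate (t - (m + 1)) 1 from rfl]
  rw [List.take_succ_eq_append_getElem (by omega), dpVals_append_singleton]
  simp

theorem outerLoop (s : List Int) (t : Nat) (h1t : 1 ≤ t) (ht : t ≤ s.length) :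
    ∀ m : Nat, 1 ≤ m → m ≤ t →
    (PySem.List.pyRange 1 (m : Int) 1).foldl (fun dp i =>
        (PySem.List.pyRange 0 i 1).foldl (fun dp j =>
          if PySem.List.pyGetD s j 0 < PySem.List.pyGetD s i 0 then
            PySem.List.pySetD dp i
              (max (PySem.List.pyGetD dp i 0) (PySem.List.pyGetD dp j 0 + 1))
          else dp) dp) (List.replicate t 1)
    = dpVals (s.take m) ++ List.replicate (t - m) 1 := by
  intro m
  induction m with
  | zero => omega
  | succ m ih =>
    intro hm1 hmt
    rcases Nat.eq_zero_or_pos m with hm0 | hmpos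
    · subst hm0
      rw [show ((1 : Nat) : Int) = 1 by simp, PySem.List.pyRange_one_eq_nil le_rfl]
      simp only [List.foldl_nil]
      have h0 : 0 < s.length := by omega
      have htake1 : s.take 1 = [s[0]'h0] := by
        rw [show (1 : Nat) = 0 + 1 from rfl, List.take_succ_eq_append_getElem h0]
        simp
      rw [htake1]
      rw [show dpVals [s[0]'h0] = [1] by
        simp [dpVals, dpPairs, dpStep, dpCand, listMax0]]
      rw [show t = (t - 1) + 1 by omega, List.replicate_succ]
      simp
    · have hcast : ((m + 1 : Nat) : Int) = (m : Int) + 1 := by push_cast; ring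
      rw [hcast, PySem.List.pyRange_one_succ_right (by exact_mod_cast hmpos),
        List.foldl_append, ih (by omega) (by omega)]
      simp only [List.foldl_cons, List.foldl_nil]
      exact innerLoop s m t (by omega) ht

theorem negIdxFold_eq_patience (soldiers : List Int) :
    ∀ t : Nat, t ≤ soldiers.length →
    (PySem.List.pyRange 0 (t : Int) 1).foldl (fun tails i =>
        if bsearchB tails (PySem.List.pyGetD soldiers (-1 - i) 0) 0 (PySem.List.len tails)
            = PySem.List.len tails
        then tails ++ [PySem.List.pyGetD soldiers (-1 - i) 0]
        else PySem.List.pySetD tails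
          (bsearchB tails (PySem.List.pyGetD soldiers (-1 - i) 0) 0 (PySem.List.len tails))
          (PySem.List.pyGetD soldiers (-1 - i) 0)) []
    = patience (soldiers.reverse.take t) := by
  intro t
  induction t with
  | zero =>
    intro _
    rw [show ((0:Nat):Int) = 0 by simp, PySem.List.pyRange_one_eq_nil le_rfl]
    simp [patience]
  | succ t ih =>
    intro h
    have hcast : ((t + 1 : Nat) : Int) = (t : Int) + 1 := by push_cast; ring
    have htr : t < soldiers.reverse.length := by simp; omega
    rw [hcast, PySem.List.pyRange_one_succ_right (by positivity), List.foldl_append,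
      ih (by omega)]
    simp only [List.foldl_cons, List.foldl_nil]
    have hx : PySem.List.pyGetD soldiers (-1 - (t : Int)) 0 = soldiers.reverse[t]'htr := by
      rw [show (-1 - (t : Int)) = -(((t + 1 : Nat) : Int)) by push_cast; ring]
      rw [PySem.List.pyGetD_neg_natCast soldiers (t + 1) 0 (by omega) (by omega)]
      rw [List.getElem_reverse]
      congr 1
      omega
    rw [hx]
    rw [List.take_succ_eq_append_getElem htr, patience_append_singleton]
    -- the loop body is patStep on the sorted tails
    have hsort := (pat_inv (soldiers.reverse.take t)).1
    rw [bsearchB_eq hsort _, patStep]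
    set c := (patience (soldiers.reverse.take t)).countP
      (fun y => decide (y < soldiers.reverse[t]'htr)) with hc
    simp only [PySem.List.len_eq]
    by_cases hcl : c = (patience (soldiers.reverse.take t)).length
    · rw [if_pos (by exact_mod_cast hcl), if_pos hcl]
    · rw [if_neg (by exact_mod_cast hcl), if_neg hcl, PySem.List.pySetD_natCast]

-- ===== VERDICT (by name: the statement is the Claim_ definition above) =====
theorem solution_spec : Claim_equal_solution := by
  unfold Claim_equal_solution
  intro N soldiers _ hpre
  unfold Pre_solution at hpre
  obtain ⟨h1, h2⟩ := hpre
  unfold Spec_solution solution solution_alt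
  simp only []
  set s := soldiers.reverse with hs
  have hslen : s.length = soldiers.length := by simp [hs]
  set t := N.toNat with htdef
  have hN : N = (t : Int) := by omega
  have h1t : 1 ≤ t := by omega
  have hts : t ≤ s.length := by omega
  -- A side
  have houter := outerLoop s t h1t hts t h1t le_rfl
  rw [hN, houter, Nat.sub_self, List.replicate_zero, List.append_nil]
  -- the nonempty dp list and its max
  have hlenv : (dpVals (s.take t)).length = t := by
    simp [dpVals, length_dpPairs]; omega
  obtain ⟨h0, tl, hdv⟩ : ∃ h0 tl, dpVals (s.take t) = h0 :: tl := by
    cases hv : dpVals (s.take t) with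
    | nil => rw [hv] at hlenv; simp at hlenv; omega
    | cons a b => exact ⟨a, b, rfl⟩
  have hh0 : 1 ≤ h0 := by
    have hmem : h0 ∈ dpVals (s.take t) := by rw [hdv]; exact List.mem_cons_self
    obtain ⟨p, hp, hp2⟩ := List.mem_map.1 hmem
    rw [← hp2]; exact one_le_snd_dpPairs hp
  rw [hdv, PySem.List.max?_id_cons, Option.getD_some,
    ← listMax0_cons_of_nonneg tl (by omega), ← hdv]
  -- B side
  rw [negIdxFold_eq_patience soldiers t (by omega), ← hs, PySem.List.len_eq,
    ← (pat_inv (s.take t)).2.1]
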